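-- pv_equiv track=rewrite | github.com/Karmaz95/crimson | scripts/crimson_mutator/modules/zerofill.py | make_zerofill
-- ===== SOURCE A (Python) =====
-- def make_zerofill(string):
--     new_string =""
--     for x in range(len(string)):
--         if string[x] != " ":
--             new_string += string[x] + "ZEROFILL"
--         else:
--             new_string += string[x]
--
--     return new_string
-- ===== SOURCE B (Python) =====
-- import re
--
-- def make_zerofill(string):
--     return re.sub(r'([^ ])', r'\1ZEROFILL', string)
-- ===== Notes on version B (the rewrite author's own statement) =====
-- stated objective: idiomatic
-- what changed: Replaced the explicit index loop with repeated string concatenation by a single regex substitution appending ZEROFILL to every non-space character.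
import Mathlib
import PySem

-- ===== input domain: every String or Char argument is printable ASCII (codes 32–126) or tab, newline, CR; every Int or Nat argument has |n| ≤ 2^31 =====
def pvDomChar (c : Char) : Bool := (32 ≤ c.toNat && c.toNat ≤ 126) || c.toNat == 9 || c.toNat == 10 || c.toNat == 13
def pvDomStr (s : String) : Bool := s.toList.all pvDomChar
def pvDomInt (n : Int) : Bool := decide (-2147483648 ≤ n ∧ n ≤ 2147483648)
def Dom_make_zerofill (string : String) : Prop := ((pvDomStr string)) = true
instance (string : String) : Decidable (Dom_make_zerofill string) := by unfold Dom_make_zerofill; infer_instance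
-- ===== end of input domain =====

-- B replaces A's index loop with per-character string concatenation by a single regex
-- substitution ('([^ ])' -> '\1ZEROFILL'); return values are proved equal on Dom.

-- ===== PORT A =====
-- A: for x in range(len(string)): append string[x] (+"ZEROFILL" when not a space) to new_string
def make_zerofill (string : String) : String :=
  String.ofList ((PySem.List.pyRange 0 (PySem.List.len string.toList) 1).foldl
    (fun acc x =>
      -- string[x]; x is always in range here, so the ' ' default is never used
      if PySem.List.pyGetD string.toList x ' ' ≠ ' '
      then acc ++ (PySem.List.pyGetD string.toList x ' ' :: "ZEROFILL".toList)
      else acc ++ [PySem.List.pyGetD string.toList x ' ']) [])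

-- ===== PORT B =====
-- B: re.sub(r'([^ ])', r'\1ZEROFILL', string) — each non-space char is replaced by itself
-- followed by "ZEROFILL"; ported as the corresponding per-character substitution (flatMap).
def make_zerofill_alt (string : String) : String :=
  String.ofList (string.toList.flatMap
    (fun c => if c ≠ ' ' then c :: "ZEROFILL".toList else [c]))

-- ===== PRECONDITION & SPEC =====
def Spec_make_zerofill (string : String) (out : String) : Prop := out = make_zerofill_alt string
instance (string : String) (out : String) : Decidable (Spec_make_zerofill string out) := by unfold Spec_make_zerofill; infer_instance

-- ===== CLAIM (what is proved, stated in full; the proofs are below) =====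
def Claim_equal_make_zerofill : Prop := ∀ (string : String), Dom_make_zerofill string → Spec_make_zerofill string (make_zerofill string)

-- ===== LEMMAS AND PROOFS =====
theorem zerofill_foldl_eq_flatMap (l acc : List Char) :
    l.foldl (fun acc c => if c ≠ ' ' then acc ++ (c :: "ZEROFILL".toList) else acc ++ [c]) acc
      = acc ++ l.flatMap (fun c => if c ≠ ' ' then c :: "ZEROFILL".toList else [c]) := by
  induction l generalizing acc with
  | nil => simp
  | cons c t ih =>
    simp only [List.foldl_cons, List.flatMap_cons]
    by_cases h : c = ' ' <;> simp only [h, if_pos, if_neg, ne_eq, not_true_eq_false,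
      not_false_eq_true] <;> rw [ih] <;> simp

-- ===== VERDICT (by name: the statement is the Claim_ definition above) =====
theorem make_zerofill_spec : Claim_equal_make_zerofill := by
  intro s _
  unfold Spec_make_zerofill make_zerofill make_zerofill_alt
  rw [show PySem.List.len s.toList = (s.toList.length : Int) from rfl,
    PySem.List.foldl_pyRange_zero_pyGetD' s.toList ' '
      (fun acc c => if c ≠ ' ' then acc ++ (c :: "ZEROFILL".toList) else acc ++ [c]) [],
    zerofill_foldl_eq_flatMap]
  simp
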